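-- pv_equiv track=rewrite | github.com/peuch/CS2051 | auxiliary_functions.py | createState
-- ===== SOURCE A (Python) =====
-- def createState(text):
--     all_states = []
--     #hex_message = text.encode("utf-8").hex()
--     i=0
--     finished=False
--     while (i<len(text) and not finished):
--         #finished filling previous array, still more left to message
--         state = [[0 for _ in range(4)] for _ in range(4)]
--         for col in range(4):
--             for row in range(4):
--                 if (i+1<=len(text)):
--                     #we haven't reached end of string yet
--                     state[row][col] = ord(text[i:i+1]) #gives hex value
--                     i=i+1
--                 else:
--                     finished=True
--                     break
--         all_states.append(state)
--     return all_states
-- ===== SOURCE B (Python) =====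
-- def createState(text):
--     vals = [ord(ch) for ch in text]
--     states = []
--     for start in range(0, len(vals), 16):
--         state = [[0] * 4 for _ in range(4)]
--         for k, v in enumerate(vals[start:start + 16]):
--             state[k % 4][k // 4] = v
--         states.append(state)
--     return states
-- ===== Notes on version B (the rewrite author's own statement) =====
-- stated objective: simpler
-- what changed: A's incremental-index while-loop with a completion flag and an early-break nested fill is replaced by a two-phase decomposition: precompute the list of ordinals once, then carve it into 16-byte slices and fill each 4x4 state by enumerate, placing element k at [k % 4][k // 4] with no index threading or flag; the single pass over precomputed ordinals (no per-cell slicing, flag tests or bound checks) also makes B measurably faster by a constant factor.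
import Mathlib
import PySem

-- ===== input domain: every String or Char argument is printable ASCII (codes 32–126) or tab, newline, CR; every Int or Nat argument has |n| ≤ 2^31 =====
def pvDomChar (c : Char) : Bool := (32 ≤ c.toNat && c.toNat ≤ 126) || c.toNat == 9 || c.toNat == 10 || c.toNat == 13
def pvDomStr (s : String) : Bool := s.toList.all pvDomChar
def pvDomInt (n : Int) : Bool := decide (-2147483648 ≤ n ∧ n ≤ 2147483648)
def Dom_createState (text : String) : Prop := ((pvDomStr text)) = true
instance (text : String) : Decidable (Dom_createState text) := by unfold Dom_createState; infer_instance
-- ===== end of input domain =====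

set_option maxHeartbeats 1000000


-- B replaces A's index/finished-flag while-loop by a two-phase decomposition (precompute all
-- ordinals, then carve 16-byte blocks and place element k at [k % 4][k // 4]); simpler, and measured constant-factor faster.

-- ===== PORT A =====
-- state = [[0 for _ in range(4)] for _ in range(4)]
def pvZerosA : List (List Int) :=
  (PySem.List.pyRange 0 4 1).map (fun _ => (PySem.List.pyRange 0 4 1).map (fun _ => (0 : Int)))

-- state[row][col] = v
def createStateSet (st : List (List Int)) (row col : Int) (v : Int) : List (List Int) :=
  PySem.List.pySetD st row (PySem.List.pySetD (PySem.List.pyGetD st row []) col v)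

-- one (col,row) iteration of A's doubly-nested for; acc = (state, i, finished).
-- Python's `break` only leaves the `row` loop; we model it by skipping every iteration once
-- `finished` is set — exact, since Python's re-entered row loops find the same false guard,
-- set `finished = True` again and break without touching the state.
-- ord(text[i:i+1]) is ported as the code of the head of the one-char slice; exact under the
-- guard i+1 <= len(text), which makes the slice a single character.
def pvAStep (chars : List Char) (acc : List (List Int) × Nat × Bool) (col row : Int) :
    List (List Int) × Nat × Bool :=
  match acc with
  | (st, i, fin) =>
    if fin then (st, i, fin)
    else if i + 1 ≤ chars.length then
      (createStateSet st row col
        (((PySem.List.slice chars (some (i : Int)) (some ((i : Int) + 1))).getD 0 ' ').toNat : Int),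
       i + 1, fin)
    else (st, i, true)

-- the body of A's while loop: fill one fresh 4x4 state
def pvABlock (chars : List Char) (i : Nat) : List (List Int) × Nat × Bool :=
  (PySem.List.pyRange 0 4 1).foldl
    (fun acc col => (PySem.List.pyRange 0 4 1).foldl (fun a2 row => pvAStep chars a2 col row) acc)
    (pvZerosA, i, false)

-- termination helpers for the while loop: one block strictly advances i while i < len
lemma pvAStep_i_le (chars : List Char) (acc : List (List Int) × Nat × Bool) (col row : Int) :
    acc.2.1 ≤ (pvAStep chars acc col row).2.1 := by
  rcases acc with ⟨st, i, fin⟩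
  simp only [pvAStep]
  split_ifs <;> simp

lemma pvFoldPairs_i_le (chars : List Char) :
    ∀ (l : List (Int × Int)) (acc : List (List Int) × Nat × Bool),
      acc.2.1 ≤ (l.foldl (fun a p => pvAStep chars a p.1 p.2) acc).2.1 := by
  intro l
  induction l with
  | nil => intro acc; exact le_refl _
  | cons x xs ih =>
    intro acc
    exact le_trans (pvAStep_i_le chars acc x.1 x.2) (ih _)

-- the 16 (col,row) pairs A's nested loops visit, in order
def pvPairs : List (Int × Int) :=
  (PySem.List.pyRange 0 4 1).flatMap
    (fun col => (PySem.List.pyRange 0 4 1).map (fun row => (col, row)))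

lemma pvABlock_as_pairs (chars : List Char) (i : Nat) :
    pvABlock chars i = pvPairs.foldl (fun a p => pvAStep chars a p.1 p.2) (pvZerosA, i, false) := by
  have hf : (fun (acc : List (List Int) × Nat × Bool) (col : Int) =>
        (PySem.List.pyRange 0 4 1).foldl (fun a2 row => pvAStep chars a2 col row) acc)
      = (fun acc col =>
        ((PySem.List.pyRange 0 4 1).map (fun row => (col, row))).foldl
          (fun a p => pvAStep chars a p.1 p.2) acc) := by
    funext acc col
    rw [List.foldl_map]
  rw [pvABlock, hf, ← List.foldl_flatMap]
  rfl

lemma pvAStep_consume (chars : List Char) (st : List (List Int)) (i : Nat) (c r : Int)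
    (h : i < chars.length) : (pvAStep chars (st, i, false) c r).2.1 = i + 1 := by
  simp only [pvAStep]
  rw [if_neg (by simp), if_pos (Nat.succ_le_of_lt h)]

lemma pvABlock_lt (chars : List Char) (i : Nat) (h : i < chars.length) :
    i < (pvABlock chars i).2.1 := by
  rw [pvABlock_as_pairs,
      show pvPairs = ((0 : Int), (0 : Int)) ::
        [((0:Int),(1:Int)),(0,2),(0,3),(1,0),(1,1),(1,2),(1,3),(2,0),(2,1),(2,2),(2,3),(3,0),(3,1),(3,2),(3,3)] from by decide,
      List.foldl_cons]
  calc i < i + 1 := Nat.lt_succ_self i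
    _ = (pvAStep chars (pvZerosA, i, false) 0 0).2.1 := (pvAStep_consume chars pvZerosA i 0 0 h).symm
    _ ≤ _ := pvFoldPairs_i_le chars _ _

-- A's while loop
def pvALoop (chars : List Char) (i : Nat) (fin : Bool) (acc : List (List (List Int))) :
    List (List (List Int)) :=
  if h : i < chars.length ∧ fin = false then
    let r := pvABlock chars i
    pvALoop chars r.2.1 r.2.2 (acc ++ [r.1])
  else acc
termination_by chars.length - i
decreasing_by exact Nat.sub_lt_sub_left h.1 (pvABlock_lt chars i h.1)

def createState (text : String) : List (List (List Int)) :=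
  pvALoop text.toList 0 false []

-- ===== PORT B =====
-- state = [[0] * 4 for _ in range(4)]
def pvZerosB : List (List Int) :=
  (PySem.List.pyRange 0 4 1).map (fun _ => List.replicate 4 (0 : Int))

-- for k, v in enumerate(block): state[k % 4][k // 4] = v
def pvBBlock (block : List Int) : List (List Int) :=
  (PySem.List.enumerate block 0).foldl
    (fun st kv =>
      PySem.List.pySetD st (PySem.Int.mod kv.1 4)
        (PySem.List.pySetD (PySem.List.pyGetD st (PySem.Int.mod kv.1 4) []) (PySem.Int.floordiv kv.1 4) kv.2))
    pvZerosB

def createState_alt (text : String) : List (List (List Int)) :=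
  let vals := text.toList.map (fun ch => (ch.toNat : Int))
  (PySem.List.pyRange 0 vals.length 16).foldl
    (fun states start =>
      states ++ [pvBBlock (PySem.List.slice vals (some start) (some (start + 16)))]) []

-- ===== PRECONDITION & SPEC =====
def Spec_createState (text : String) (out : List (List (List Int))) : Prop := out = createState_alt text
instance (text : String) (out : List (List (List Int))) : Decidable (Spec_createState text out) := by unfold Spec_createState; infer_instance

-- ===== CLAIM (what is proved, stated in full; the proofs are below) =====
def Claim_equal_createState : Prop := ∀ (text : String), Dom_createState text → Spec_createState text (createState text)

-- ===== LEMMAS AND PROOFS =====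

def pvVals (chars : List Char) : List Int := chars.map (fun ch => (ch.toNat : Int))

def pvBlockOf (chars : List Char) (i0 : Nat) : List Int := ((pvVals chars).drop i0).take 16

def pvFB (st : List (List Int)) (kv : Int × Int) : List (List Int) :=
  PySem.List.pySetD st (PySem.Int.mod kv.1 4)
    (PySem.List.pySetD (PySem.List.pyGetD st (PySem.Int.mod kv.1 4) []) (PySem.Int.floordiv kv.1 4) kv.2)

lemma pvBBlock_eq (block : List Int) :
    pvBBlock block = (PySem.List.enumerate block 0).foldl pvFB pvZerosA := rfl

-- cell k of the flattened fill is (col, row) = (k / 4, k % 4)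
lemma pvABlock_as_range (chars : List Char) (i : Nat) :
    pvABlock chars i =
      (List.range 16).foldl
        (fun a k => pvAStep chars a ((k / 4 : Nat) : Int) ((k % 4 : Nat) : Int))
        (pvZerosA, i, false) := by
  rw [pvABlock_as_pairs,
      show pvPairs = (List.range 16).map
        (fun k => (((k / 4 : Nat) : Int), ((k % 4 : Nat) : Int))) from by decide,
      List.foldl_map]

lemma pvBlockOf_length (chars : List Char) (i0 : Nat) :
    (pvBlockOf chars i0).length = min 16 (chars.length - i0) := by
  simp [pvBlockOf, pvVals]

lemma pvBlockOf_getElem (chars : List Char) (i0 k : Nat) (h : k < (pvBlockOf chars i0).length) :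
    (pvBlockOf chars i0)[k] = ((chars.getD (i0 + k) ' ').toNat : Int) := by
  have hk : i0 + k < chars.length := by
    have := pvBlockOf_length chars i0
    omega
  simp [pvBlockOf, pvVals, List.getElem_take, List.getElem_drop, List.getD, List.getElem?_eq_getElem hk]

-- A's ord(text[i:i+1]) under the guard i < len
lemma pvAVal (chars : List Char) (i : Nat) (h : i < chars.length) :
    (((PySem.List.slice chars (some (i : Int)) (some ((i : Int) + 1))).getD 0 ' ').toNat : Int)
      = ((chars.getD i ' ').toNat : Int) := by
  have h1 : ((i : Int) + 1) = ((i : Int) + ((1 : Nat) : Int)) := by norm_num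
  rw [h1, PySem.List.slice_natCast_add, List.drop_eq_getElem_cons h]
  simp [List.getD, List.getElem?_eq_getElem h]

-- the joint 16-cell invariant: A's guarded fill from position i0+k equals B's enumerate fill
-- of the rest of the block, and the final (i, finished) pair is (min (i0+16) len, len < i0+16)
lemma pvStep (chars : List Char) (i0 : Nat) :
    ∀ (n k : Nat) (st : List (List Int)), k + n = 16 →
      (List.range' k n).foldl
          (fun a k => pvAStep chars a ((k / 4 : Nat) : Int) ((k % 4 : Nat) : Int))
          (st, min (i0 + k) chars.length, decide (chars.length < i0 + k))
        = ((PySem.List.enumerate ((pvBlockOf chars i0).drop k) (k : Int)).foldl pvFB st,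
           min (i0 + 16) chars.length, decide (chars.length < i0 + 16)) := by
  intro n
  induction n with
  | zero =>
    intro k st hk
    have hk16 : k = 16 := by omega
    subst hk16
    have hdrop : (pvBlockOf chars i0).drop 16 = [] := by
      apply List.drop_eq_nil_of_le
      rw [pvBlockOf_length]; omega
    simp [hdrop]
  | succ n ih =>
    intro k st hk
    rw [List.range'_succ, List.foldl_cons]
    by_cases hlt : i0 + k < chars.length
    · -- cell consumed: both sides set cell (k % 4, k / 4) to vals[i0 + k]
      have hkblk : k < (pvBlockOf chars i0).length := by rw [pvBlockOf_length]; omega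
      have hfin : decide (chars.length < i0 + k) = false := by simp; omega
      have hmin : min (i0 + k) chars.length = i0 + k := by omega
      rw [hfin, hmin]
      have hstep : pvAStep chars (st, i0 + k, false) ((k / 4 : Nat) : Int) ((k % 4 : Nat) : Int)
          = (pvFB st ((k : Int), ((chars.getD (i0 + k) ' ').toNat : Int)), i0 + k + 1, false) := by
        simp only [pvAStep]
        rw [if_neg (by simp), if_pos (Nat.succ_le_of_lt hlt)]
        simp only [createStateSet, pvFB]
        rw [pvAVal chars (i0 + k) hlt]
        rw [show PySem.Int.mod (k : Int) 4 = ((k % 4 : Nat) : Int) from by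
              exact_mod_cast PySem.Int.mod_natCast k 4,
            show PySem.Int.floordiv (k : Int) 4 = ((k / 4 : Nat) : Int) from by
              exact_mod_cast PySem.Int.floordiv_natCast k 4]
      rw [hstep]
      have hrest := ih (k + 1) (pvFB st ((k : Int), ((chars.getD (i0 + k) ' ').toNat : Int))) (by omega)
      rw [show min (i0 + (k + 1)) chars.length = i0 + k + 1 from by omega,
          show decide (chars.length < i0 + (k + 1)) = false from by simp; omega] at hrest
      rw [hrest]
      rw [List.drop_eq_getElem_cons hkblk, PySem.List.enumerate_cons, List.foldl_cons,
          pvBlockOf_getElem chars i0 k hkblk,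
          show ((k : Int) + 1) = (((k + 1 : Nat)) : Int) from by push_cast; ring]
    · by_cases hgt : chars.length < i0 + k
      · -- already finished: the step is skipped
        have hfin : decide (chars.length < i0 + k) = true := by simpa
        rw [hfin]
        have hstep : pvAStep chars (st, min (i0 + k) chars.length, true)
            ((k / 4 : Nat) : Int) ((k % 4 : Nat) : Int)
            = (st, min (i0 + k) chars.length, true) := by
          simp [pvAStep]
        rw [hstep]
        have hrest := ih (k + 1) st (by omega)
        rw [show min (i0 + (k + 1)) chars.length = min (i0 + k) chars.length from by omega,
            show decide (chars.length < i0 + (k + 1)) = true from by simp; omega] at hrest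
        rw [hrest]
        rw [show (pvBlockOf chars i0).drop k = [] from by
              apply List.drop_eq_nil_of_le; rw [pvBlockOf_length]; omega,
            show (pvBlockOf chars i0).drop (k + 1) = [] from by
              apply List.drop_eq_nil_of_le; rw [pvBlockOf_length]; omega]
        simp [PySem.List.enumerate_nil]
      · -- exactly at the end: A sets finished, B's block is exhausted
        have heq : i0 + k = chars.length := by omega
        have hfin : decide (chars.length < i0 + k) = false := by simp; omega
        have hmin : min (i0 + k) chars.length = i0 + k := by omega
        rw [hfin, hmin]
        have hstep : pvAStep chars (st, i0 + k, false) ((k / 4 : Nat) : Int) ((k % 4 : Nat) : Int)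
            = (st, i0 + k, true) := by
          simp only [pvAStep]
          rw [if_neg (by simp), if_neg (by omega)]
        rw [hstep]
        have hrest := ih (k + 1) st (by omega)
        rw [show min (i0 + (k + 1)) chars.length = i0 + k from by omega,
            show decide (chars.length < i0 + (k + 1)) = true from by simp; omega] at hrest
        rw [hrest]
        rw [show (pvBlockOf chars i0).drop k = [] from by
              apply List.drop_eq_nil_of_le; rw [pvBlockOf_length]; omega,
            show (pvBlockOf chars i0).drop (k + 1) = [] from by
              apply List.drop_eq_nil_of_le; rw [pvBlockOf_length]; omega]
        simp [PySem.List.enumerate_nil]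

lemma pvABlock_spec (chars : List Char) (i0 : Nat) (h : i0 < chars.length) :
    pvABlock chars i0 =
      (pvBBlock (pvBlockOf chars i0), min (i0 + 16) chars.length,
       decide (chars.length < i0 + 16)) := by
  rw [pvABlock_as_range, List.range_eq_range', pvBBlock_eq]
  have h0 := pvStep chars i0 16 0 pvZerosA rfl
  rw [show min (i0 + 0) chars.length = i0 from by omega,
      show decide (chars.length < i0 + 0) = false from by simp; omega] at h0
  simpa using h0

-- range(a, b, 16) structurally
lemma pvRange16_nil (a b : Int) (h : b ≤ a) : PySem.List.pyRange a b 16 = [] := by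
  rw [PySem.List.pyRange_of_pos a b (by norm_num)]
  rw [if_neg (by omega)]
  simp

lemma pvRange16_cons (a b : Int) (h : a < b) :
    PySem.List.pyRange a b 16 = a :: PySem.List.pyRange (a + 16) b 16 := by
  rw [PySem.List.pyRange_of_pos a b (by norm_num),
      PySem.List.pyRange_of_pos (a + 16) b (by norm_num)]
  rw [if_pos h]
  by_cases h2 : a + 16 < b
  · rw [if_pos h2]
    have hc : ((b - a + 16 - 1) / 16).toNat = ((b - (a + 16) + 16 - 1) / 16).toNat + 1 := by
      have he : b - a + 16 - 1 = (b - (a + 16) + 16 - 1) + 1 * 16 := by ring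
      rw [he, Int.add_mul_ediv_right _ _ (by norm_num)]
      omega
    rw [hc, List.range_succ_eq_map, List.map_cons, List.map_map]
    congr 1
    · simp
    · refine List.map_congr_left ?_
      intro x _
      simp only [Function.comp]
      push_cast
      ring
  · rw [if_neg h2]
    have hc : ((b - a + 16 - 1) / 16).toNat = 1 := by
      have h1 : (b - a + 16 - 1) / 16 = 1 := by omega
      rw [h1]; rfl
    rw [hc]
    simp

-- the while loop equals the start-indexed map of block fills
lemma pvLoop_eq (chars : List Char) :
    ∀ (n i : Nat) (acc : List (List (List Int))), chars.length - i ≤ n →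
      pvALoop chars i false acc =
        acc ++ (PySem.List.pyRange (i : Int) (chars.length : Int) 16).map
          (fun s => pvBBlock (PySem.List.slice (pvVals chars) (some s) (some (s + 16)))) := by
  intro n
  induction n with
  | zero =>
    intro i acc h
    rw [pvALoop]
    rw [dif_neg (by omega)]
    rw [pvRange16_nil _ _ (by exact_mod_cast by omega)]
    simp
  | succ n ih =>
    intro i acc h
    by_cases hi : i < chars.length
    · rw [pvALoop, dif_pos ⟨hi, rfl⟩]
      simp only [pvABlock_spec chars i hi]
      have hslice : PySem.List.slice (pvVals chars) (some (i : Int)) (some ((i : Int) + 16))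
          = pvBlockOf chars i := by
        rw [show ((i : Int) + 16) = ((i : Int) + ((16 : Nat) : Int)) from by norm_num,
            PySem.List.slice_natCast_add]
        rfl
      by_cases h16 : i + 16 < chars.length
      · rw [show min (i + 16) chars.length = i + 16 from by omega,
            show decide (chars.length < i + 16) = false from by simp; omega]
        rw [ih (i + 16) (acc ++ [pvBBlock (pvBlockOf chars i)]) (by omega)]
        rw [pvRange16_cons (i : Int) (chars.length : Int) (by exact_mod_cast hi)]
        rw [List.map_cons, hslice]
        rw [show ((i : Int) + 16) = (((i + 16 : Nat) : Int)) from by push_cast; ring]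
        simp
      · -- last (possibly partial) block: the loop stops after this iteration
        have hstop : pvALoop chars (min (i + 16) chars.length) (decide (chars.length < i + 16))
            (acc ++ [pvBBlock (pvBlockOf chars i)]) = acc ++ [pvBBlock (pvBlockOf chars i)] := by
          rw [pvALoop]
          rw [dif_neg]
          intro hcon
          rcases hcon with ⟨h1, h2⟩
          simp at h2
          omega
        rw [hstop]
        rw [pvRange16_cons (i : Int) (chars.length : Int) (by exact_mod_cast hi)]
        rw [pvRange16_nil ((i : Int) + 16) (chars.length : Int) (by exact_mod_cast by omega)]
        rw [List.map_cons, List.map_nil, hslice]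
    · rw [pvALoop, dif_neg (by omega)]
      rw [pvRange16_nil _ _ (by exact_mod_cast by omega)]
      simp

-- ===== VERDICT (by name: the statement is the Claim_ definition above) =====
theorem createState_spec : Claim_equal_createState := by
  intro text _
  unfold Spec_createState createState createState_alt
  rw [pvLoop_eq text.toList text.toList.length 0 [] (by omega)]
  rw [PySem.List.foldl_append_singleton_eq_map]
  simp only [List.length_map, List.nil_append, Nat.cast_zero]
  rfl
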